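-- pv_equiv track=rewrite | github.com/ChristianLaraa/Compiladores | AvanceProyecto/avc_proy.py | separa_tokens
-- ===== SOURCE A (Python) =====
-- def es_simbolo_esp(car):
--     return car in "+-*;/,()=<>"
--
-- def es_separador(car):
--     return car in " \n\t"
--
-- def separa_tokens(linea):
--     tokens = []
--     token = ""
--     i = 0
--     dentro_cadena = False
--     while i < len(linea):
--         c = linea[i]
--         if dentro_cadena:
--             token += c
--             if c == '"':
--                 tokens.append(token)
--                 token = ""
--                 dentro_cadena = False
--         else:
--             if c == '"':
--                 if token:
--                     tokens.append(token)
--                     token = ""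
--                 token = c
--                 dentro_cadena = True
--             elif es_simbolo_esp(c):
--                 if token:
--                     tokens.append(token)
--                     token = ""
--                 if c == '=' and i + 1 < len(linea) and linea[i + 1] == '=':
--                     tokens.append("==")
--                     i += 1
--                 else:
--                     tokens.append(c)
--             elif es_separador(c):
--                 if token:
--                     tokens.append(token)
--                     token = ""
--             else:
--                 token += c
--         i += 1
--     if token:
--         tokens.append(token)
--     return tokens
-- ===== SOURCE B (Python) =====
-- SYM = "+-*;/,()=<>"
-- SEP = " \n\t"
--
-- def separa_tokens(linea):
--     # token-at-a-time scanner: emits each whole token via find/slicing (no per-char accumulator),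
--     # instead of A's char-by-char state machine with an accumulator.
--     tokens = []
--     i = 0
--     n = len(linea)
--     while i < n:
--         c = linea[i]
--         if c in SEP:
--             i += 1
--         elif c == '"':
--             j = linea.find('"', i + 1)
--             if j == -1:
--                 tokens.append(linea[i:])
--                 i = n
--             else:
--                 tokens.append(linea[i:j + 1])
--                 i = j + 1
--         elif c in SYM:
--             if c == '=' and i + 1 < n and linea[i + 1] == '=':
--                 tokens.append("==")
--                 i += 2
--             else:
--                 tokens.append(c)
--                 i += 1
--         else:
--             j = i
--             while j < n and linea[j] not in SEP and linea[j] not in SYM and linea[j] != '"':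
--                 j += 1
--             tokens.append(linea[i:j])
--             i = j
--     return tokens
-- ===== Notes on version B (the rewrite author's own statement) =====
-- stated objective: faster
-- what changed: Replaces A's char-by-char state machine (string accumulator 'token += c' + inside-string flag) with a token-at-a-time scanner that emits each whole token directly via find/slicing, avoiding quadratic string concatenation.
import Mathlib
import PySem

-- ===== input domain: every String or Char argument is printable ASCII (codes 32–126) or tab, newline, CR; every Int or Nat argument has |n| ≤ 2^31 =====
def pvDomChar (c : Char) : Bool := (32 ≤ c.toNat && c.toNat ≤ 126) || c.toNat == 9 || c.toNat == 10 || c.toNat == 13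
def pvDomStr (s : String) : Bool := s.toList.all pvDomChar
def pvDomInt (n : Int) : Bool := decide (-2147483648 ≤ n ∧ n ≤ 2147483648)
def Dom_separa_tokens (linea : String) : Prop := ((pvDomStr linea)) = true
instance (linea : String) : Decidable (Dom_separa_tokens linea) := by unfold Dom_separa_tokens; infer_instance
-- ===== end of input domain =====

-- B replaces A's char-by-char state machine (token accumulator built by repeated concatenation) with a token-at-a-time scanner emitting whole tokens via find/slicing; measured faster on the generated timing inputs.

-- ===== PORT A =====
def es_simbolo_esp (car : Char) : Bool := car ∈ "+-*;/,()=<>".toList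

def es_separador (car : Char) : Bool := car ∈ " \n\t".toList

-- A's while-loop over index i, transliterated as recursion over the remaining characters;
-- state: token accumulator (List Char), dentro_cadena flag, tokens so far (appended in order).
def sepALoop : List Char → List Char → Bool → List String → List String
  | [], token, _, tokens => if token ≠ [] then tokens ++ [String.ofList token] else tokens
  | c :: rest, token, dentro, tokens =>
    if dentro then
      let token' := token ++ [c]
      if c = '"' then sepALoop rest [] false (tokens ++ [String.ofList token'])
      else sepALoop rest token' true tokens
    else if c = '"' then
      let tokens' := if token ≠ [] then tokens ++ [String.ofList token] else tokens
      sepALoop rest [c] true tokens'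
    else if es_simbolo_esp c then
      let tokens' := if token ≠ [] then tokens ++ [String.ofList token] else tokens
      -- 'i += 1' inside the '==' branch skips the peeked character (rest.tail)
      if c = '=' ∧ rest.head? = some '=' then sepALoop rest.tail [] false (tokens' ++ ["=="])
      else sepALoop rest [] false (tokens' ++ [String.ofList [c]])
    else if es_separador c then
      sepALoop rest [] false (if token ≠ [] then tokens ++ [String.ofList token] else tokens)
    else
      sepALoop rest (token ++ [c]) false tokens
  termination_by cs => cs.length
  decreasing_by all_goals (simp [List.length_tail]; try omega)

def separa_tokens (linea : String) : List String := sepALoop linea.toList [] false []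

-- ===== PORT B =====
-- a character that continues a word: not a separator, not a special symbol, not a quote
def es_palabra (c : Char) : Bool := ¬ (es_separador c ∨ es_simbolo_esp c ∨ c = '"')

-- B scans token-at-a-time: separators skipped, a string taken up to the next quote
-- (linea.find ported as takeWhile/dropWhile over the rest), '==' by one-char lookahead,
-- a word as a maximal run of word characters (the inner j-loop + slice).
def sepBLoop : List Char → List String
  | [] => []
  | c :: rest =>
    if es_separador c then sepBLoop rest
    else if c = '"' then
      let pre := rest.takeWhile (fun d => d ≠ '"')
      let suf := rest.dropWhile (fun d => d ≠ '"')
      if suf.isEmpty then [String.ofList (c :: pre)]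
      else String.ofList (c :: pre ++ ['"']) :: sepBLoop suf.tail
    else if es_simbolo_esp c then
      if c = '=' ∧ rest.head? = some '=' then "==" :: sepBLoop rest.tail
      else String.ofList [c] :: sepBLoop rest
    else
      String.ofList (c :: rest.takeWhile es_palabra) :: sepBLoop (rest.dropWhile es_palabra)
  termination_by cs => cs.length
  decreasing_by
    all_goals
      (have h1 := List.length_dropWhile_le (fun d => d ≠ '"') rest
       have h2 := List.length_dropWhile_le es_palabra rest
       simp [List.length_tail] at h1 h2 ⊢
       try omega)

def separa_tokens_alt (linea : String) : List String := sepBLoop linea.toList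

-- ===== PRECONDITION & SPEC =====
def Spec_separa_tokens (linea : String) (out : List String) : Prop := out = separa_tokens_alt linea
instance (linea : String) (out : List String) : Decidable (Spec_separa_tokens linea out) := by unfold Spec_separa_tokens; infer_instance

-- ===== CLAIM (what is proved, stated in full; the proofs are below) =====
def Claim_equal_separa_tokens : Prop := ∀ (linea : String), Dom_separa_tokens linea → Spec_separa_tokens linea (separa_tokens linea)

-- ===== LEMMAS AND PROOFS =====

theorem es_sym_not_sep (c : Char) (h : es_simbolo_esp c = true) : es_separador c = false := by
  simp [es_simbolo_esp] at h
  rcases h with rfl | rfl | rfl | rfl | rfl | rfl | rfl | rfl | rfl | rfl | rfl <;> decide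

theorem es_pal_false_of_sym (c : Char) (h : es_simbolo_esp c = true) : es_palabra c = false := by
  simp [es_palabra, h]

theorem es_pal_false_of_sep (c : Char) (h : es_separador c = true) : es_palabra c = false := by
  simp [es_palabra, h]

-- A's special-symbol step, with the '==' lookahead still as an if (proved once, outside the induction)
theorem sepALoop_sym_nil (c : Char) (rest : List Char) (tokens : List String)
    (hq : ¬ c = '"') (hsym : es_simbolo_esp c = true) :
    sepALoop (c :: rest) [] false tokens =
      if c = '=' ∧ rest.head? = some '=' then sepALoop rest.tail [] false (tokens ++ ["=="])
      else sepALoop rest [] false (tokens ++ [String.ofList [c]]) := by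
  rw [sepALoop]; simp [hq, hsym, es_sym_not_sep c hsym]

theorem sepALoop_sym_tok (c : Char) (rest : List Char) (t : List Char) (tokens : List String)
    (ht : t ≠ []) (hq : ¬ c = '"') (hsym : es_simbolo_esp c = true) :
    sepALoop (c :: rest) t false tokens =
      if c = '=' ∧ rest.head? = some '=' then
        sepALoop rest.tail [] false (tokens ++ [String.ofList t] ++ ["=="])
      else sepALoop rest [] false (tokens ++ [String.ofList t] ++ [String.ofList [c]]) := by
  rw [sepALoop]; simp [hq, hsym, es_sym_not_sep c hsym, ht]

-- what A yields from the "accumulating a word t" state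
def wordGlue (t : List Char) (cs : List Char) : List String :=
  String.ofList (t ++ cs.takeWhile es_palabra) :: sepBLoop (cs.dropWhile es_palabra)

-- what A yields from the "inside a string with partial token t" state
def strGlue (t : List Char) (cs : List Char) : List String :=
  let suf := cs.dropWhile (fun d => d ≠ '"')
  if suf.isEmpty then [String.ofList (t ++ cs.takeWhile (fun d => d ≠ '"'))]
  else String.ofList (t ++ cs.takeWhile (fun d => d ≠ '"') ++ ['"']) :: sepBLoop suf.tail

-- branch equation lemmas for sepBLoop
theorem sepBLoop_nil : sepBLoop [] = [] := by simp [sepBLoop]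

theorem sepBLoop_sep (c : Char) (rest : List Char) (h : es_separador c = true) :
    sepBLoop (c :: rest) = sepBLoop rest := by
  rw [sepBLoop]; simp [h]

theorem sepBLoop_quote (rest : List Char) :
    sepBLoop ('"' :: rest) = strGlue ['"'] rest := by
  rw [sepBLoop, strGlue]; simp [show es_separador '"' = false from by decide]

theorem sepBLoop_sym (c : Char) (rest : List Char) (hq : ¬ c = '"')
    (h : es_simbolo_esp c = true) :
    sepBLoop (c :: rest) =
      if c = '=' ∧ rest.head? = some '=' then "==" :: sepBLoop rest.tail
      else String.ofList [c] :: sepBLoop rest := by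
  rw [sepBLoop]; simp [h, hq, es_sym_not_sep c h]

theorem sepBLoop_word (c : Char) (rest : List Char) (h : es_palabra c = true) :
    sepBLoop (c :: rest) = wordGlue [c] rest := by
  have h' := h
  simp [es_palabra] at h'
  rw [sepBLoop, wordGlue]
  simp [h'.1, h'.2.1, h'.2.2]

-- glue lemmas
theorem wordGlue_nil (t : List Char) : wordGlue t [] = [String.ofList t] := by
  simp [wordGlue, sepBLoop_nil]

theorem wordGlue_cons (t : List Char) (c : Char) (rest : List Char) (h : es_palabra c = true) :
    wordGlue t (c :: rest) = wordGlue (t ++ [c]) rest := by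
  simp [wordGlue, h]

theorem wordGlue_stop (t : List Char) (c : Char) (rest : List Char) (h : es_palabra c = false) :
    wordGlue t (c :: rest) = String.ofList t :: sepBLoop (c :: rest) := by
  simp [wordGlue, h]

theorem strGlue_nil (t : List Char) : strGlue t [] = [String.ofList t] := by
  simp [strGlue]

theorem strGlue_cons (t : List Char) (c : Char) (rest : List Char) (hc : ¬ c = '"') :
    strGlue t (c :: rest) = strGlue (t ++ [c]) rest := by
  simp [strGlue, hc]

theorem strGlue_quote (t : List Char) (rest : List Char) :
    strGlue t ('"' :: rest) = String.ofList (t ++ ['"']) :: sepBLoop rest := by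
  simp [strGlue]

theorem sepALoop_main : ∀ (n : Nat) (cs : List Char), cs.length ≤ n → ∀ (tokens : List String),
    (sepALoop cs [] false tokens = tokens ++ sepBLoop cs)
    ∧ (∀ t, t ≠ [] → sepALoop cs t false tokens = tokens ++ wordGlue t cs)
    ∧ (∀ t, t ≠ [] → sepALoop cs t true tokens = tokens ++ strGlue t cs) := by
  intro n
  induction n with
  | zero =>
    intro cs hlen
    have : cs = [] := List.length_eq_zero_iff.mp (Nat.le_zero.mp hlen)
    subst this
    intro tokens
    refine ⟨by simp [sepALoop, sepBLoop_nil], ?_, ?_⟩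
    · intro t ht; simp [sepALoop, wordGlue_nil, ht]
    · intro t ht; simp [sepALoop, strGlue_nil, ht]
  | succ n ih =>
    intro cs hlen
    match cs with
    | [] =>
      intro tokens
      refine ⟨by simp [sepALoop, sepBLoop_nil], ?_, ?_⟩
      · intro t ht; simp [sepALoop, wordGlue_nil, ht]
      · intro t ht; simp [sepALoop, strGlue_nil, ht]
    | c :: rest =>
      intro tokens
      have hr : rest.length ≤ n := by simpa using Nat.le_of_succ_le_succ hlen
      have hrt : rest.tail.length ≤ n := by
        simp [List.length_tail]; omega
      by_cases hq : c = '"'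
      · subst hq
        refine ⟨?_, ?_, ?_⟩
        · rw [show sepALoop ('"' :: rest) [] false tokens = sepALoop rest ['"'] true tokens
              from by simp [sepALoop]]
          rw [(ih rest hr tokens).2.2 ['"'] (by simp), sepBLoop_quote]
        · intro t ht
          rw [show sepALoop ('"' :: rest) t false tokens
                = sepALoop rest ['"'] true (tokens ++ [String.ofList t])
              from by simp [sepALoop, ht]]
          rw [(ih rest hr _).2.2 ['"'] (by simp)]
          rw [wordGlue_stop t '"' rest (by decide), sepBLoop_quote]
          simp
        · intro t ht
          rw [show sepALoop ('"' :: rest) t true tokens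
                = sepALoop rest [] false (tokens ++ [String.ofList (t ++ ['"'])])
              from by simp [sepALoop]]
          rw [(ih rest hr _).1, strGlue_quote]
          simp
      · by_cases hsym : es_simbolo_esp c = true
        · have hsep : es_separador c = false := es_sym_not_sep c hsym
          have hpal : es_palabra c = false := es_pal_false_of_sym c hsym
          refine ⟨?_, ?_, ?_⟩
          · rw [sepALoop_sym_nil c rest tokens hq hsym, sepBLoop_sym c rest hq hsym]
            by_cases heq : c = '=' ∧ rest.head? = some '='
            · rw [if_pos heq, if_pos heq, (ih rest.tail hrt _).1]
              simp
            · rw [if_neg heq, if_neg heq, (ih rest hr _).1]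
              simp
          · intro t ht
            rw [sepALoop_sym_tok c rest t tokens ht hq hsym,
                wordGlue_stop t c rest hpal, sepBLoop_sym c rest hq hsym]
            by_cases heq : c = '=' ∧ rest.head? = some '='
            · rw [if_pos heq, if_pos heq, (ih rest.tail hrt _).1]
              simp
            · rw [if_neg heq, if_neg heq, (ih rest hr _).1]
              simp
          · intro t ht
            rw [show sepALoop (c :: rest) t true tokens = sepALoop rest (t ++ [c]) true tokens
                from by simp [sepALoop, hq]]
            rw [(ih rest hr _).2.2 (t ++ [c]) (by simp), strGlue_cons t c rest hq]
        · by_cases hsep : es_separador c = true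
          · refine ⟨?_, ?_, ?_⟩
            · rw [show sepALoop (c :: rest) [] false tokens = sepALoop rest [] false tokens
                  from by simp [sepALoop, hq, hsym, hsep]]
              rw [(ih rest hr _).1, sepBLoop_sep c rest hsep]
            · intro t ht
              rw [show sepALoop (c :: rest) t false tokens
                    = sepALoop rest [] false (tokens ++ [String.ofList t])
                  from by simp [sepALoop, hq, hsym, hsep, ht]]
              rw [(ih rest hr _).1]
              rw [wordGlue_stop t c rest (es_pal_false_of_sep c hsep), sepBLoop_sep c rest hsep]
              simp
            · intro t ht
              rw [show sepALoop (c :: rest) t true tokens = sepALoop rest (t ++ [c]) true tokens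
                  from by simp [sepALoop, hq]]
              rw [(ih rest hr _).2.2 (t ++ [c]) (by simp), strGlue_cons t c rest hq]
          · have hpal : es_palabra c = true := by
              simp [es_palabra, hq, hsym, hsep]
            refine ⟨?_, ?_, ?_⟩
            · rw [show sepALoop (c :: rest) [] false tokens = sepALoop rest [c] false tokens
                  from by simp [sepALoop, hq, hsym, hsep]]
              rw [(ih rest hr _).2.1 [c] (by simp), sepBLoop_word c rest hpal]
            · intro t ht
              rw [show sepALoop (c :: rest) t false tokens = sepALoop rest (t ++ [c]) false tokens
                  from by simp [sepALoop, hq, hsym, hsep]]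
              rw [(ih rest hr _).2.1 (t ++ [c]) (by simp), wordGlue_cons t c rest hpal]
            · intro t ht
              rw [show sepALoop (c :: rest) t true tokens = sepALoop rest (t ++ [c]) true tokens
                  from by simp [sepALoop, hq]]
              rw [(ih rest hr _).2.2 (t ++ [c]) (by simp), strGlue_cons t c rest hq]

-- ===== VERDICT (by name: the statement is the Claim_ definition above) =====
theorem separa_tokens_spec : Claim_equal_separa_tokens := by
  intro linea _
  unfold Spec_separa_tokens separa_tokens separa_tokens_alt
  simpa using (sepALoop_main linea.toList.length linea.toList le_rfl []).1
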